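-- pv_equiv track=rewrite | github.com/VOXXXX1874/X-R1 | src/x_r1/utils/regex_math.py | response_cv_parse_regex
-- ===== SOURCE A (Python) =====
-- def response_cv_parse_regex(text):
--     """Parse the response text to decompose the thinking part."""
--     # separate the response into lines
--     lines = text.split("\n")
--     # remove leading and trailing whitespace from each line
--     lines = [line.strip() for line in lines]
--     # remove lines with too little words or too much words
--     lines = [line for line in lines if len(line) > 50 and len(line) < 1000]
--     # record the end position of each line in text
--     end_pos = []
--     for line in lines:
--         # find the position of the line in the text
--         pos = text.find(line)
--         if pos != -1:
--             end_pos.append(pos + len(line))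
--     # make the lines all lower case
--     lines = [line.lower() for line in lines]
--     # remove whitespace
--     lines = [line.replace(" ", "") for line in lines]
--     return lines, end_pos
-- ===== SOURCE B (Python) =====
-- def response_cv_parse_regex(text):
--     """Parse the response text to decompose the thinking part.
--
--     End positions are computed arithmetically from cumulative line offsets in a
--     single pass (no text.find scan per line), so each kept line's own end
--     position is recorded even when its content also occurs earlier in the text.
--     """
--     lines = []
--     end_pos = []
--     pos = 0
--     for raw in text.split("\n"):
--         s = raw.strip()
--         if 50 < len(s) < 1000:
--             lead = len(raw) - len(raw.lstrip())
--             end_pos.append(pos + lead + len(s))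
--             lines.append(s.lower().replace(" ", ""))
--         pos += len(raw) + 1
--     return lines, end_pos
-- ===== Notes on version B (the rewrite author's own statement) =====
-- stated objective: alternative
-- what changed: B computes each kept line's end position by cumulative offset arithmetic (start offset + leading-whitespace length + stripped length) in a single pass over the split lines, instead of A's per-line text.find scan over the whole text; on lines whose stripped content already occurs earlier in the text, A records the end of the first occurrence while B records the line's own end.
-- intended difference: On texts where some kept line's stripped content already occurs earlier in the text (e.g. a duplicated long line), A records the end position of the first occurrence found by text.find, while B records the line's own end position, which is the intended value since the function sets out to record each line's own end position. — e.g. on response_cv_parse_regex("xxxxxxxxxxxxxxxxxxxxxxxxxxxxxxxxxxxxxxxxxxxxxxxxxxx\nxxxxxxxxxxxxxxxxxxxxxxxxxxxxxxxxxxxxxxxxxxxxxxxxxxx"): A returns (["xxxxxxxxxxxxxxxxxxxxxxxxxxxxxxxxxxxxxxxxxxxxxxxxxxx", "xxxxxxxxxxxxxxxxxxxxxxxxxxxxxxxxxxxxxxxxxxxxxxxxxxx"], [51, 5…, B returns (["xxxxxxxxxxxxxxxxxxxxxxxxxxxxxxxxxxxxxxxxxxxxxxxxxxx", "xxxxxxxxxxxxxxxxxxxxxxxxxxxxxxxxxxxxxxxxxxxxxxxxxxx"],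 [51, 1…
import Mathlib
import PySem

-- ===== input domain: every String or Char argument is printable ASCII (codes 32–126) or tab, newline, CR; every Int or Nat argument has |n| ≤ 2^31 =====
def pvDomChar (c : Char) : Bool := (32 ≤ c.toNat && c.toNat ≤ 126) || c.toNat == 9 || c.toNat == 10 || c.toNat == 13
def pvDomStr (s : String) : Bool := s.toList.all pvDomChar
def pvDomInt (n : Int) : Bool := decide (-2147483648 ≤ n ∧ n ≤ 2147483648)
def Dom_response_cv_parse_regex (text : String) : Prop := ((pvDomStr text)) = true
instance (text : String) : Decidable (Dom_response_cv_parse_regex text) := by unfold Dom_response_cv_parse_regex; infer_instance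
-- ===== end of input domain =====

-- B replaces A's per-line text.find scan by cumulative offset arithmetic in one pass; on lines whose
-- content also occurs earlier in the text, B records the line's own end position (D_ below) instead of
-- the first occurrence's.

-- ===== PORT A =====
def response_cv_parse_regex (text : String) : List String × List Int :=
  let lines := (PySem.Str.split? text "\n").getD []
  let lines := lines.map (fun line => PySem.Str.strip line)
  let lines := lines.filter (fun line => 50 < PySem.Str.len line && PySem.Str.len line < 1000)
  let end_pos := lines.foldl (fun acc line =>
      let pos := PySem.Str.find text line
      if pos ≠ -1 then acc ++ [pos + PySem.Str.len line] else acc) ([] : List Int)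
  let lines := lines.map (fun line => PySem.Str.lower line)
  let lines := lines.map (fun line => PySem.Str.replace line " " "")
  (lines, end_pos)

-- ===== PORT B =====
def response_cv_parse_regex_alt (text : String) : List String × List Int :=
  let r := ((PySem.Str.split? text "\n").getD []).foldl
    (fun (acc : List String × List Int × Int) raw =>
      let s := PySem.Str.strip raw
      if 50 < PySem.Str.len s && PySem.Str.len s < 1000 then
        let lead := PySem.Str.len raw - PySem.Str.len (PySem.Str.lstrip raw)
        (acc.1 ++ [PySem.Str.replace (PySem.Str.lower s) " " ""],
         acc.2.1 ++ [acc.2.2 + lead + PySem.Str.len s],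
         acc.2.2 + PySem.Str.len raw + 1)
      else (acc.1, acc.2.1, acc.2.2 + PySem.Str.len raw + 1))
    ([], [], 0)
  (r.1, r.2.1)

-- ===== PRECONDITION & SPEC =====
-- On texts where some kept line's stripped content already occurs among the earlier lines, A records
-- the end of that FIRST occurrence (text.find) for the line, while B records the line's own end
-- position, which is the intended value (the function's comment asks for each line's own end position).
def D_response_cv_parse_regex (text : String) : Prop :=
  ∃ i ∈ List.range (text.toList.splitOn '\n').length,
    let s := PySem.Chars.strip ((text.toList.splitOn '\n').getD i [])
    50 < s.length ∧ s.length < 1000 ∧ s <:+: ['\n'].intercalate ((text.toList.splitOn '\n').take i)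
instance (text : String) : Decidable (D_response_cv_parse_regex text) := by
  unfold D_response_cv_parse_regex; infer_instance

def Spec_response_cv_parse_regex (text : String) (out : List String × List Int) : Prop := ¬ D_response_cv_parse_regex text → out = response_cv_parse_regex_alt text
instance (text : String) (out : List String × List Int) : Decidable (Spec_response_cv_parse_regex text out) := by unfold Spec_response_cv_parse_regex; infer_instance

def pvDiffWitness_response_cv_parse_regex : String :=
  "xxxxxxxxxxxxxxxxxxxxxxxxxxxxxxxxxxxxxxxxxxxxxxxxxxx\nxxxxxxxxxxxxxxxxxxxxxxxxxxxxxxxxxxxxxxxxxxxxxxxxxxx"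

def pvDiffWitnessOut_response_cv_parse_regex : (List String × List Int) × (List String × List Int) :=
  ((["xxxxxxxxxxxxxxxxxxxxxxxxxxxxxxxxxxxxxxxxxxxxxxxxxxx",
     "xxxxxxxxxxxxxxxxxxxxxxxxxxxxxxxxxxxxxxxxxxxxxxxxxxx"], [51, 51]),
   (["xxxxxxxxxxxxxxxxxxxxxxxxxxxxxxxxxxxxxxxxxxxxxxxxxxx",
     "xxxxxxxxxxxxxxxxxxxxxxxxxxxxxxxxxxxxxxxxxxxxxxxxxxx"], [51, 103]))

-- ===== CLAIM (what is proved, stated in full; the proofs are below) =====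
def Claim_unchanged_response_cv_parse_regex : Prop := ∀ (text : String), Dom_response_cv_parse_regex text → Spec_response_cv_parse_regex text (response_cv_parse_regex text)
def Claim_changed_response_cv_parse_regex : Prop := Dom_response_cv_parse_regex (pvDiffWitness_response_cv_parse_regex) ∧ D_response_cv_parse_regex (pvDiffWitness_response_cv_parse_regex) ∧ response_cv_parse_regex (pvDiffWitness_response_cv_parse_regex) = pvDiffWitnessOut_response_cv_parse_regex.1 ∧ response_cv_parse_regex_alt (pvDiffWitness_response_cv_parse_regex) = pvDiffWitnessOut_response_cv_parse_regex.2 ∧ pvDiffWitnessOut_response_cv_parse_regex.1 ≠ pvDiffWitnessOut_response_cv_parse_regex.2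

def Claim_exact_response_cv_parse_regex : Prop := ∀ (text : String), Dom_response_cv_parse_regex text → D_response_cv_parse_regex text → response_cv_parse_regex text ≠ response_cv_parse_regex_alt text

-- ===== LEMMAS AND PROOFS =====

-- the split lines of a text, each paired with the offset at which it starts
def pvStarts (ps : List (List Char)) (off : Nat) : List (Nat × List Char) :=
  match ps with
  | [] => []
  | p :: rest => (off, p) :: pvStarts rest (off + p.length + 1)

-- a line (at offset pr.1) is "bad": it is kept by the length filter and its stripped content
-- also occurs in the text strictly before its own stripped start position
def pvBad (cs : List Char) (pr : Nat × List Char) : Prop :=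
  (50 < (PySem.Chars.strip pr.2).length ∧ (PySem.Chars.strip pr.2).length < 1000) ∧
  ∃ j ∈ List.range (pr.1 + (pr.2.length - (PySem.Chars.lstrip pr.2).length)),
    PySem.Chars.strip pr.2 <+: cs.drop j


theorem pv_modifyHead_id {α : Type} (l : List (List α)) :
    l.modifyHead (fun x => x) = l := by cases l <;> simp

theorem pv_splitOn_go (c : Char) :
    ∀ (fuel : Nat) (l cur : List Char) (acc : List (List Char)), l.length < fuel →
      PySem.Chars.splitOn.go [c] fuel l cur acc
        = acc.reverse ++ (l.splitOn c).modifyHead (fun x => cur.reverse ++ x) := by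
  intro fuel
  induction fuel with
  | zero => intro l cur acc h; omega
  | succ n ih =>
    intro l cur acc h
    cases l with
    | nil => simp [PySem.Chars.splitOn.go, List.splitOn]
    | cons a rest =>
      by_cases hc : a = c
      · subst hc
        have : [a].isPrefixOf (a :: rest) = true := by simp [List.isPrefixOf]
        rw [PySem.Chars.splitOn.go]
        simp only [this, if_true, List.length_singleton, List.drop_one, List.tail_cons]
        rw [ih rest [] ((cur.reverse) :: acc) (by simpa using Nat.lt_of_succ_lt_succ h)]
        simp [List.splitOn, List.splitOnP_cons, pv_modifyHead_id]
      · have : [c].isPrefixOf (a :: rest) = false := by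
          simp [List.isPrefixOf]; exact fun hh => (hc hh.symm).elim
        rw [PySem.Chars.splitOn.go]
        simp only [this, Bool.false_eq_true, if_false]
        rw [ih rest (a :: cur) acc (by simpa using Nat.lt_of_succ_lt_succ h)]
        have hmod : ∀ (m : List (List Char)),
            m.modifyHead (fun x => (a :: cur).reverse ++ x)
              = (m.modifyHead (fun x => a :: x)).modifyHead (fun x => cur.reverse ++ x) := by
          intro m; cases m <;> simp
        simp [List.splitOn, List.splitOnP_cons, hc, Function.comp_def]

theorem pv_splitOn (cs : List Char) (c : Char) :
    PySem.Chars.splitOn cs [c] = cs.splitOn c := by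
  unfold PySem.Chars.splitOn
  rw [pv_splitOn_go c (cs.length + 1) cs [] [] (by omega)]
  simp [pv_modifyHead_id]

theorem pv_rstrip_prefix (s : List Char) : PySem.Chars.rstrip s <+: s := by
  unfold PySem.Chars.rstrip
  conv_rhs => rw [← s.reverse_reverse, ← List.takeWhile_append_dropWhile
    (p := PySem.Chars.isspace) (l := s.reverse)]
  rw [List.reverse_append]
  exact List.prefix_append _ _

theorem pv_lstrip_len_le (s : List Char) : (PySem.Chars.lstrip s).length ≤ s.length := by
  unfold PySem.Chars.lstrip
  simpa using List.length_dropWhile_le (p := PySem.Chars.isspace) (l := s)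

theorem pv_drop_lead (s : List Char) :
    s.drop (s.length - (PySem.Chars.lstrip s).length) = PySem.Chars.lstrip s := by
  unfold PySem.Chars.lstrip
  generalize hd : List.dropWhile PySem.Chars.isspace s = d
  have ht : List.takeWhile PySem.Chars.isspace s ++ d = s := by
    rw [← hd]; exact List.takeWhile_append_dropWhile
  rw [← ht]
  have hlen : (List.takeWhile PySem.Chars.isspace s ++ d).length - d.length
      = (List.takeWhile PySem.Chars.isspace s).length := by
    simp
  rw [hlen, List.drop_left]

-- the stripped line occurs in the text at its own stripped start position
theorem pv_strip_occurs (cs p : List Char) (off : Nat) (hp : p <+: cs.drop off) :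
    PySem.Chars.strip p <+: cs.drop (off + (p.length - (PySem.Chars.lstrip p).length)) := by
  have h1 : PySem.Chars.strip p <+: PySem.Chars.lstrip p := pv_rstrip_prefix _
  rw [← pv_drop_lead p] at h1
  have h2 : p.drop (p.length - (PySem.Chars.lstrip p).length)
      <+: (cs.drop off).drop (p.length - (PySem.Chars.lstrip p).length) := by
    obtain ⟨t, ht⟩ := hp
    rw [← ht, List.drop_append_of_le_length (by omega)]
    exact (List.prefix_append _ t)
  rw [List.drop_drop] at h2
  have := h1.trans h2
  simpa [Nat.add_comm] using this

-- under ¬pvBad, A's text.find returns exactly the line's own stripped start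
theorem pv_find_own (cs p : List Char) (off : Nat) (hp : p <+: cs.drop off)
    (hk : 50 < (PySem.Chars.strip p).length ∧ (PySem.Chars.strip p).length < 1000)
    (hok : ¬ pvBad cs (off, p)) :
    PySem.Chars.find cs (PySem.Chars.strip p)
      = ((off + (p.length - (PySem.Chars.lstrip p).length) : Nat) : Int) := by
  set s := PySem.Chars.strip p with hs
  set a := off + (p.length - (PySem.Chars.lstrip p).length) with ha
  have hocc : s <+: cs.drop a := pv_strip_occurs cs p off hp
  have hnoe : ∀ j < a, ¬ s <+: cs.drop j := by
    intro j hj hcon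
    exact hok ⟨hk, ⟨j, by simpa using hj, hcon⟩⟩
  have hinf : s <:+: cs := hocc.isInfix.trans (List.drop_suffix a cs).isInfix
  have hnn : 0 ≤ PySem.Chars.find cs s := (PySem.Chars.find_nonneg_iff cs s).2 hinf
  obtain ⟨hfocc, hfmin⟩ := PySem.Chars.find_spec hnn
  have heq : (PySem.Chars.find cs s).toNat = a := by
    rcases Nat.lt_trichotomy (PySem.Chars.find cs s).toNat a with h | h | h
    · exact absurd hfocc (hnoe _ h)
    · exact h
    · exact absurd hocc (hfmin a h)
  omega

-- B's fold over the raw lines (from offset off) equals A's staged passes, appended to the accumulators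
theorem pv_fold (text : String) :
    ∀ (sl : List String) (off : Nat) (l0 : List String) (e0 : List Int) (pos : Int),
      pos = (off : Int) →
      (['\n'].intercalate (sl.map String.toList) <+: text.toList.drop off) →
      (∀ pr ∈ pvStarts (sl.map String.toList) off, ¬ pvBad text.toList pr) →
      sl.foldl
        (fun (acc : List String × List Int × Int) raw =>
          let s := PySem.Str.strip raw
          if 50 < PySem.Str.len s && PySem.Str.len s < 1000 then
            let lead := PySem.Str.len raw - PySem.Str.len (PySem.Str.lstrip raw)
            (acc.1 ++ [PySem.Str.replace (PySem.Str.lower s) " " ""],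
             acc.2.1 ++ [acc.2.2 + lead + PySem.Str.len s],
             acc.2.2 + PySem.Str.len raw + 1)
          else (acc.1, acc.2.1, acc.2.2 + PySem.Str.len raw + 1))
        (l0, e0, pos)
      = (l0 ++ ((sl.map (fun line => PySem.Str.strip line)).filter
                  (fun line => 50 < PySem.Str.len line && PySem.Str.len line < 1000)).map
                 (fun line => PySem.Str.replace (PySem.Str.lower line) " " ""),
         ((sl.map (fun line => PySem.Str.strip line)).filter
              (fun line => 50 < PySem.Str.len line && PySem.Str.len line < 1000)).foldl
            (fun acc line =>
              let pos := PySem.Str.find text line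
              if pos ≠ -1 then acc ++ [pos + PySem.Str.len line] else acc) e0,
         pos + (sl.map (fun r => PySem.Str.len r + 1)).sum) := by
  intro sl
  induction sl with
  | nil => intro off l0 e0 pos hpos _ _; simp
  | cons raw rest ih =>
    intro off l0 e0 pos hpos hpre hok
    subst hpos
    have hpraw : raw.toList <+: text.toList.drop off := by
      rcases rest with _ | ⟨q, rest'⟩
      · simpa [List.intercalate] using hpre
      · have : ['\n'].intercalate (raw.toList :: (q :: rest').map String.toList)
            = raw.toList ++ '\n' :: ['\n'].intercalate ((q :: rest').map String.toList) := by
          simp [List.intercalate]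
        rw [List.map_cons, this] at hpre
        exact (List.prefix_append _ _).trans hpre
    have hpre' : ['\n'].intercalate (rest.map String.toList)
        <+: text.toList.drop (off + raw.toList.length + 1) := by
      rcases rest with _ | ⟨q, rest'⟩
      · simp [List.intercalate]
      · have hshape : ['\n'].intercalate ((raw :: q :: rest').map String.toList)
            = (raw.toList ++ ['\n']) ++ ['\n'].intercalate ((q :: rest').map String.toList) := by
          simp [List.intercalate]
        rw [hshape] at hpre
        obtain ⟨t, ht⟩ := hpre
        have hdrop : (text.toList.drop off).drop (raw.toList.length + 1)
            = ['\n'].intercalate ((q :: rest').map String.toList) ++ t := by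
          rw [← ht, List.append_assoc, List.drop_left' (by simp)]
        rw [List.drop_drop] at hdrop
        refine ⟨t, ?_⟩
        rw [← hdrop]
        congr 1
    have hokh := hok (off, raw.toList) (by simp [pvStarts])
    have hokt : ∀ pr ∈ pvStarts (rest.map String.toList) (off + raw.toList.length + 1),
        ¬ pvBad text.toList pr := by
      intro pr hpr; exact hok pr (by simp [pvStarts]; right; exact hpr)
    have hlstrip_le := pv_lstrip_len_le raw.toList
    have hposS : ((off : Int) + PySem.Str.len raw + 1)
        = ((off + raw.toList.length + 1 : Nat) : Int) := by
      simp only [PySem.Str.len_eq]; push_cast; ring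
    by_cases hkeep : (50 < PySem.Str.len (PySem.Str.strip raw)
        && PySem.Str.len (PySem.Str.strip raw) < 1000) = true
    · -- kept line: find = own stripped start
      have hkN : 50 < (PySem.Chars.strip raw.toList).length
          ∧ (PySem.Chars.strip raw.toList).length < 1000 := by
        simp only [Bool.and_eq_true, decide_eq_true_eq, PySem.Str.len_eq,
          PySem.Str.toList_strip] at hkeep
        exact ⟨by exact_mod_cast hkeep.1, by exact_mod_cast hkeep.2⟩
      have hfind : PySem.Chars.find text.toList (PySem.Chars.strip raw.toList)
          = ((off + (raw.toList.length - (PySem.Chars.lstrip raw.toList).length) : Nat) : Int) :=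
        pv_find_own text.toList raw.toList off hpraw hkN hokh
      have hfindS : PySem.Str.find text (PySem.Str.strip raw)
          = ((off + (raw.toList.length - (PySem.Chars.lstrip raw.toList).length) : Nat) : Int) := by
        rw [PySem.Str.find_eq, PySem.Str.toList_strip, hfind]
      have hne : PySem.Str.find text (PySem.Str.strip raw) ≠ -1 := by
        rw [hfindS]; omega
      simp only [List.foldl_cons, List.map_cons, List.filter_cons, hkeep, if_true]
      rw [ih (off + raw.toList.length + 1) _ _ _ hposS hpre' hokt]
      rw [if_pos hne]
      have hval : (off : Int) + (PySem.Str.len raw - PySem.Str.len (PySem.Str.lstrip raw))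
            + PySem.Str.len (PySem.Str.strip raw)
          = PySem.Str.find text (PySem.Str.strip raw) + PySem.Str.len (PySem.Str.strip raw) := by
        rw [hfindS]
        simp only [PySem.Str.len_eq, PySem.Str.toList_lstrip]
        push_cast [Nat.cast_sub hlstrip_le]
        ring
      simp only [Prod.mk.injEq, List.sum_cons]
      refine ⟨by simp, by rw [hval], by ring⟩
    · simp only [List.foldl_cons, List.map_cons, List.filter_cons, hkeep, Bool.false_eq_true,
        if_false]
      rw [ih (off + raw.toList.length + 1) _ _ _ hposS hpre' hokt]
      simp only [Prod.mk.injEq, List.sum_cons]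
      refine ⟨trivial, trivial, by ring⟩


-- intercalate over a cons, with the separator written as a replicate
theorem pv_ic_cons (p : List Char) (l : List (List Char)) :
    ['\n'].intercalate (p :: l)
      = p ++ List.replicate (min l.length 1) '\n' ++ ['\n'].intercalate l := by
  cases l <;> simp [List.intercalate]

-- every entry of pvStarts is the i-th line at its cumulative start offset
theorem pv_starts_mem :
    ∀ (ps : List (List Char)) (off : Nat) (pr : Nat × List Char), pr ∈ pvStarts ps off →
      ∃ i, i < ps.length ∧
        pr = (off + (['\n'].intercalate (ps.take i)).length + min i 1, ps.getD i []) := by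
  intro ps
  induction ps with
  | nil => intro off pr h; simp [pvStarts] at h
  | cons p r ih =>
    intro off pr h
    have h' : pr = (off, p) ∨ pr ∈ pvStarts r (off + p.length + 1) := by
      have hu : pvStarts (p :: r) off = (off, p) :: pvStarts r (off + p.length + 1) := rfl
      rw [hu] at h
      exact List.mem_cons.1 h
    rcases h' with h' | h'
    · exact ⟨0, by simp, by simp [h', List.intercalate]⟩
    · obtain ⟨i, hi, hpr⟩ := ih (off + p.length + 1) pr h'
      refine ⟨i + 1, by simpa using hi, ?_⟩
      have hti : (r.take i).length = i := by rw [List.length_take]; omega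
      have hlen : (['\n'].intercalate ((p :: r).take (i + 1))).length
          = p.length + min i 1 + (['\n'].intercalate (r.take i)).length := by
        rw [List.take_succ_cons, pv_ic_cons]
        simp [hti]
        omega
      rw [hpr]
      simp only [Prod.mk.injEq, List.getD_cons_succ]
      refine ⟨by rw [hlen]; omega, trivial⟩

-- the text decomposes as (earlier lines) ++ separator ++ (i-th line) ++ rest
theorem pv_decomp :
    ∀ (i : Nat) (ps : List (List Char)), i < ps.length →
      ∃ t, ['\n'].intercalate ps
        = ['\n'].intercalate (ps.take i) ++ List.replicate (min i 1) '\n' ++ ps.getD i [] ++ t := by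
  intro i
  induction i with
  | zero =>
    intro ps hps
    cases ps with
    | nil => simp at hps
    | cons p r =>
      refine ⟨List.replicate (min r.length 1) '\n' ++ ['\n'].intercalate r, ?_⟩
      rw [pv_ic_cons]
      simp [List.intercalate]
  | succ i ih =>
    intro ps hps
    cases ps with
    | nil => simp at hps
    | cons p r =>
      have hi : i < r.length := by simpa using hps
      obtain ⟨t, ht⟩ := ih r hi
      refine ⟨t, ?_⟩
      rw [pv_ic_cons, ht, List.take_succ_cons, pv_ic_cons]
      simp only [List.getD_cons_succ]
      have h1 : min r.length 1 = 1 := by omega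
      rcases Nat.eq_zero_or_pos i with h0 | h0
      · subst h0
        simp [h1, List.intercalate]
      · have hti : (r.take i).length = i := by rw [List.length_take]; omega
        have h3 : min (r.take i).length 1 = 1 := by omega
        have h4 : min (i + 1) 1 = 1 := by omega
        have h5 : min i 1 = 1 := by omega
        rw [h1, h3, h4, h5] at *
        simp [List.append_assoc]

-- splitOn pieces never contain the separator
theorem pv_splitOnP_no_sep (c : Char) :
    ∀ (cs l : List Char), l ∈ List.splitOnP (· == c) cs → c ∉ l := by
  intro cs
  induction cs with
  | nil =>
    intro l hl
    have : l = [] := by simpa using hl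
    simp [this]
  | cons a rest ih =>
    intro l hl
    rw [List.splitOnP_cons] at hl
    by_cases hc : (a == c) = true
    · simp only [hc, if_true, List.mem_cons] at hl
      rcases hl with hl | hl
      · simp [hl]
      · exact ih l hl
    · simp only [hc, Bool.false_eq_true, if_false] at hl
      cases hm : List.splitOnP (· == c) rest with
      | nil => rw [hm] at hl; simp at hl
      | cons h0 m =>
        rw [hm] at hl
        simp only [List.modifyHead, List.mem_cons] at hl
        rcases hl with hl | hl
        · subst hl
          intro hmem
          rcases List.mem_cons.1 hmem with h | h
          · exact hc (by simp [h])
          · exact ih h0 (by rw [hm]; exact List.mem_cons_self) h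
        · exact ih l (by rw [hm]; exact List.mem_cons_of_mem _ hl)

theorem pv_splitOn_no_sep (c : Char) (cs l : List Char) (h : l ∈ cs.splitOn c) : c ∉ l := by
  rw [List.splitOn] at h
  exact pv_splitOnP_no_sep c cs l h

-- the stripped line is an infix of the raw line
theorem pv_strip_infix (p : List Char) : PySem.Chars.strip p <:+: p := by
  have h1 : PySem.Chars.strip p <+: PySem.Chars.lstrip p := pv_rstrip_prefix _
  exact h1.isInfix.trans (List.dropWhile_suffix (l := p) PySem.Chars.isspace).isInfix

-- the stripped line starts with a non-whitespace character
theorem pv_strip_head (p : List Char) (h : 0 < (PySem.Chars.strip p).length) :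
    PySem.Chars.isspace ((PySem.Chars.strip p)[0]'h) = false := by
  have hpre : PySem.Chars.strip p <+: PySem.Chars.lstrip p := pv_rstrip_prefix _
  have hlen : 0 < (PySem.Chars.lstrip p).length := by
    have := hpre.length_le; omega
  have hgE : (PySem.Chars.strip p)[0]'h = (PySem.Chars.lstrip p)[0]'hlen := hpre.getElem h
  rw [hgE]
  have hne : List.dropWhile PySem.Chars.isspace p ≠ [] := by
    unfold PySem.Chars.lstrip at hlen
    exact List.ne_nil_of_length_pos hlen
  have := List.head_dropWhile_not PySem.Chars.isspace hne
  rw [List.head_eq_getElem] at this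
  exact this

-- an occurrence of a kept stripped line strictly before its own stripped start lies
-- entirely inside the earlier lines
theorem pv_cross (cs IC p t : List Char) (i1 j : Nat)
    (hcs : cs = IC ++ List.replicate i1 '\n' ++ p ++ t)
    (hlen : 0 < (PySem.Chars.strip p).length)
    (hnl : '\n' ∉ p) (hi1 : i1 ≤ 1) (hi0 : i1 = 0 → IC = [])
    (hj : j < IC.length + i1 + (p.length - (PySem.Chars.lstrip p).length))
    (hocc : PySem.Chars.strip p <+: cs.drop j) :
    PySem.Chars.strip p <:+: IC := by
  set s := PySem.Chars.strip p with hs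
  have hsne : s ≠ [] := List.ne_nil_of_length_pos hlen
  have hjlt : j < cs.length := by
    by_contra hcon
    have : cs.drop j = [] := List.drop_eq_nil_of_le (by omega)
    rw [this, List.prefix_nil] at hocc
    exact hsne hocc
  have hlead : p.length - (PySem.Chars.lstrip p).length
      = (List.takeWhile PySem.Chars.isspace p).length := by
    unfold PySem.Chars.lstrip
    have := congrArg List.length
      (List.takeWhile_append_dropWhile (p := PySem.Chars.isspace) (l := p))
    simp only [List.length_append] at this
    omega
  have hs0 : ∀ (hsl : 0 < s.length) (hj0 : 0 < (cs.drop j).length), s[0]'hsl = cs[j]'hjlt := by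
    intro hsl hj0
    have := hocc.getElem (i := 0) hsl
    rw [this]
    simp [List.getElem_drop]
  by_cases hcase : IC.length + i1 ≤ j
  · -- occurrence would start in the leading-whitespace zone: impossible
    exfalso
    have hk : j - (IC.length + i1) < (List.takeWhile PySem.Chars.isspace p).length := by omega
    have hkp : j - (IC.length + i1) < p.length := by
      have := (List.takeWhile_prefix (l := p) PySem.Chars.isspace).length_le
      omega
    have hcsj : cs[j]'hjlt = p[j - (IC.length + i1)]'hkp := by
      subst hcs
      simp only [List.getElem_append, List.length_append, List.length_replicate]
      split_ifs <;> first | (exfalso; omega) | rfl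
    have hsp : PySem.Chars.isspace (p[j - (IC.length + i1)]'hkp) = true := by
      have hg : (List.takeWhile PySem.Chars.isspace p)[j - (IC.length + i1)]'hk
          = p[j - (IC.length + i1)]'hkp :=
        (List.takeWhile_prefix PySem.Chars.isspace).getElem hk
      rw [← hg]
      exact List.mem_takeWhile_imp (List.getElem_mem hk)
    have hd0 : 0 < (cs.drop j).length := by simp; omega
    have h1 : PySem.Chars.isspace (s[0]'hlen) = false := pv_strip_head p hlen
    have h2 : PySem.Chars.isspace (s[0]'hlen) = true := by
      rw [hs0 hlen hd0, hcsj]; exact hsp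
    rw [h1] at h2
    exact Bool.false_ne_true h2
  · -- the occurrence starts before the separator line break
    have hji : j < IC.length + i1 := by omega
    have hi11 : i1 = 1 := by
      rcases Nat.eq_zero_or_pos i1 with h0 | h0
      · rw [hi0 h0] at hji; simp [h0] at hji
      · omega
    subst hi11
    by_cases hb : j + s.length ≤ IC.length
    · -- the whole occurrence lies inside the earlier lines
      have hICtake : cs.take IC.length = IC := by
        subst hcs
        rw [show IC ++ List.replicate 1 '\n' ++ p ++ t
            = IC ++ (List.replicate 1 '\n' ++ p ++ t) by simp [List.append_assoc]]
        exact List.take_left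
      have hpre2 : s <+: (cs.drop j).take (IC.length - j) :=
        List.prefix_take_iff.2 ⟨hocc, by omega⟩
      rw [← List.drop_take, hICtake] at hpre2
      exact hpre2.isInfix.trans (List.drop_suffix j IC).isInfix
    · -- the occurrence would cover the line break: impossible
      exfalso
      have hmlt : IC.length - j < s.length := by omega
      have hcslen : IC.length < cs.length := by subst hcs; simp
      have hsm : s[IC.length - j]'hmlt = cs[IC.length]'hcslen := by
        have := hocc.getElem (i := IC.length - j) hmlt
        rw [this]
        rw [List.getElem_drop]
        congr 1
        omega
      have hcsm : cs[IC.length]'hcslen = '\n' := by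
        subst hcs
        simp only [List.getElem_append, List.length_append, List.length_replicate]
        split_ifs <;> first | (exfalso; omega) | simp
      have : '\n' ∈ s := by
        rw [← hcsm, ← hsm]; exact List.getElem_mem hmlt
      exact hnl ((pv_strip_infix p).mem this)


-- ¬D_ rules out every "bad" line of pvStarts
theorem pv_bridge (text : String) (hD : ¬ D_response_cv_parse_regex text) :
    ∀ pr ∈ pvStarts (text.toList.splitOn '\n') 0, ¬ pvBad text.toList pr := by
  intro pr hpr hbad
  obtain ⟨i, hi, hpreq⟩ := pv_starts_mem _ 0 pr hpr
  subst hpreq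
  obtain ⟨⟨hk1, hk2⟩, j, hjr, hocc⟩ := hbad
  simp only at hk1 hk2 hocc hjr
  obtain ⟨t, ht⟩ := pv_decomp i _ hi
  have hmem : (text.toList.splitOn '\n').getD i [] ∈ text.toList.splitOn '\n' := by
    rw [List.getD_eq_getElem _ _ hi]; exact List.getElem_mem hi
  have hnl : '\n' ∉ (text.toList.splitOn '\n').getD i [] := pv_splitOn_no_sep '\n' _ _ hmem
  have hcs : text.toList
      = ['\n'].intercalate ((text.toList.splitOn '\n').take i)
        ++ List.replicate (min i 1) '\n' ++ (text.toList.splitOn '\n').getD i [] ++ t := by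
    conv_lhs => rw [← List.intercalate_splitOn text.toList '\n']
    exact ht
  apply hD
  refine ⟨i, List.mem_range.2 hi, hk1, hk2, ?_⟩
  refine pv_cross text.toList _ _ t (min i 1) j hcs (by omega) hnl (by omega) ?_ ?_ hocc
  · intro h0
    have h0' : i = 0 := by omega
    subst h0'; simp [List.intercalate]
  · have := List.mem_range.1 hjr
    omega


-- A's end_pos, characterised as a map over the kept offset-annotated lines
theorem pv_A_end (text : String) :
    ∀ (sl : List String) (off : Nat) (e0 : List Int),
      (['\n'].intercalate (sl.map String.toList) <+: text.toList.drop off) →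
      ((sl.map (fun line => PySem.Str.strip line)).filter
          (fun line => 50 < PySem.Str.len line && PySem.Str.len line < 1000)).foldl
        (fun acc line =>
          let pos := PySem.Str.find text line
          if pos ≠ -1 then acc ++ [pos + PySem.Str.len line] else acc) e0
      = e0 ++ ((pvStarts (sl.map String.toList) off).filter
            (fun pr => decide (50 < (PySem.Chars.strip pr.2).length)
              && decide ((PySem.Chars.strip pr.2).length < 1000))).map
          (fun pr => PySem.Chars.find text.toList (PySem.Chars.strip pr.2)
            + ((PySem.Chars.strip pr.2).length : Int)) := by
  intro sl
  induction sl with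
  | nil => intro off e0 _; simp [pvStarts]
  | cons raw rest ih =>
    intro off e0 hpre
    have hpraw : raw.toList <+: text.toList.drop off := by
      rcases rest with _ | ⟨q, rest'⟩
      · simpa [List.intercalate] using hpre
      · have : ['\n'].intercalate (raw.toList :: (q :: rest').map String.toList)
            = raw.toList ++ '\n' :: ['\n'].intercalate ((q :: rest').map String.toList) := by
          simp [List.intercalate]
        rw [List.map_cons, this] at hpre
        exact (List.prefix_append _ _).trans hpre
    have hpre' : ['\n'].intercalate (rest.map String.toList)
        <+: text.toList.drop (off + raw.toList.length + 1) := by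
      rcases rest with _ | ⟨q, rest'⟩
      · simp [List.intercalate]
      · have hshape : ['\n'].intercalate ((raw :: q :: rest').map String.toList)
            = (raw.toList ++ ['\n']) ++ ['\n'].intercalate ((q :: rest').map String.toList) := by
          simp [List.intercalate]
        rw [hshape] at hpre
        obtain ⟨t, ht⟩ := hpre
        have hdrop : (text.toList.drop off).drop (raw.toList.length + 1)
            = ['\n'].intercalate ((q :: rest').map String.toList) ++ t := by
          rw [← ht, List.append_assoc, List.drop_left' (by simp)]
        rw [List.drop_drop] at hdrop
        refine ⟨t, ?_⟩
        rw [← hdrop]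
        congr 1
    have hstart : pvStarts ((raw :: rest).map String.toList) off
        = (off, raw.toList) :: pvStarts (rest.map String.toList) (off + raw.toList.length + 1) :=
      rfl
    by_cases hkN : 50 < (PySem.Chars.strip raw.toList).length
        ∧ (PySem.Chars.strip raw.toList).length < 1000
    · have hkeep : (50 < PySem.Str.len (PySem.Str.strip raw)
          && PySem.Str.len (PySem.Str.strip raw) < 1000) = true := by
        simp only [Bool.and_eq_true, decide_eq_true_eq, PySem.Str.len_eq, PySem.Str.toList_strip]
        exact ⟨by exact_mod_cast hkN.1, by exact_mod_cast hkN.2⟩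
      have hocc := pv_strip_occurs text.toList raw.toList off hpraw
      have hnn : 0 ≤ PySem.Chars.find text.toList (PySem.Chars.strip raw.toList) :=
        (PySem.Chars.find_nonneg_iff _ _).2
          (hocc.isInfix.trans (List.drop_suffix _ text.toList).isInfix)
      have hne : PySem.Str.find text (PySem.Str.strip raw) ≠ -1 := by
        rw [PySem.Str.find_eq, PySem.Str.toList_strip]; omega
      rw [hstart]
      simp only [List.map_cons, List.filter_cons, hkeep, if_true, hkN.1, hkN.2]
      simp only [List.foldl_cons, ne_eq, hne, not_false_iff]
      rw [ih (off + raw.toList.length + 1) _ hpre']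
      have hv : PySem.Str.find text (PySem.Str.strip raw) + PySem.Str.len (PySem.Str.strip raw)
          = PySem.Chars.find text.toList (PySem.Chars.strip raw.toList)
            + ((PySem.Chars.strip raw.toList).length : Int) := by
        rw [PySem.Str.find_eq, PySem.Str.toList_strip, PySem.Str.len_eq, PySem.Str.toList_strip]
      rw [hv]
      simp
    · have hkeep : (50 < PySem.Str.len (PySem.Str.strip raw)
          && PySem.Str.len (PySem.Str.strip raw) < 1000) = false := by
        simp only [Bool.and_eq_true, decide_eq_true_eq, PySem.Str.len_eq, PySem.Str.toList_strip,
          ← Bool.not_eq_true]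
        intro hcon
        exact hkN ⟨by exact_mod_cast hcon.1, by exact_mod_cast hcon.2⟩
      have hkeep2 : (decide (50 < (PySem.Chars.strip raw.toList).length)
          && decide ((PySem.Chars.strip raw.toList).length < 1000)) = false := by
        simp only [Bool.and_eq_true, decide_eq_true_eq, ← Bool.not_eq_true]
        intro hcon
        exact hkN ⟨hcon.1, hcon.2⟩
      rw [hstart]
      simp only [List.map_cons, List.filter_cons, hkeep, hkeep2, Bool.false_eq_true, if_false]
      exact ih (off + raw.toList.length + 1) _ hpre'

-- B's end_pos, characterised as a map over the kept offset-annotated lines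
theorem pv_B_end (_text : String) :
    ∀ (sl : List String) (off : Nat) (l0 : List String) (e0 : List Int) (pos : Int),
      pos = (off : Int) →
      (sl.foldl
        (fun (acc : List String × List Int × Int) raw =>
          let s := PySem.Str.strip raw
          if 50 < PySem.Str.len s && PySem.Str.len s < 1000 then
            let lead := PySem.Str.len raw - PySem.Str.len (PySem.Str.lstrip raw)
            (acc.1 ++ [PySem.Str.replace (PySem.Str.lower s) " " ""],
             acc.2.1 ++ [acc.2.2 + lead + PySem.Str.len s],
             acc.2.2 + PySem.Str.len raw + 1)
          else (acc.1, acc.2.1, acc.2.2 + PySem.Str.len raw + 1))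
        (l0, e0, pos)).2.1
      = e0 ++ ((pvStarts (sl.map String.toList) off).filter
            (fun pr => decide (50 < (PySem.Chars.strip pr.2).length)
              && decide ((PySem.Chars.strip pr.2).length < 1000))).map
          (fun pr => ((pr.1 + (pr.2.length - (PySem.Chars.lstrip pr.2).length)
            + (PySem.Chars.strip pr.2).length : Nat) : Int)) := by
  intro sl
  induction sl with
  | nil => intro off l0 e0 pos hpos; simp [pvStarts]
  | cons raw rest ih =>
    intro off l0 e0 pos hpos
    subst hpos
    have hstart : pvStarts ((raw :: rest).map String.toList) off
        = (off, raw.toList) :: pvStarts (rest.map String.toList) (off + raw.toList.length + 1) :=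
      rfl
    have hposS : ((off : Int) + PySem.Str.len raw + 1)
        = ((off + raw.toList.length + 1 : Nat) : Int) := by
      simp only [PySem.Str.len_eq]; push_cast; ring
    have hlstrip_le := pv_lstrip_len_le raw.toList
    by_cases hkN : 50 < (PySem.Chars.strip raw.toList).length
        ∧ (PySem.Chars.strip raw.toList).length < 1000
    · have hkeep : (50 < PySem.Str.len (PySem.Str.strip raw)
          && PySem.Str.len (PySem.Str.strip raw) < 1000) = true := by
        simp only [Bool.and_eq_true, decide_eq_true_eq, PySem.Str.len_eq, PySem.Str.toList_strip]
        exact ⟨by exact_mod_cast hkN.1, by exact_mod_cast hkN.2⟩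
      rw [hstart]
      simp only [List.filter_cons, hkN.1, hkN.2]
      simp only [List.foldl_cons, hkeep, if_true]
      rw [ih (off + raw.toList.length + 1) _ _ _ hposS]
      have hv : (off : Int) + (PySem.Str.len raw - PySem.Str.len (PySem.Str.lstrip raw))
            + PySem.Str.len (PySem.Str.strip raw)
          = ((off + (raw.toList.length - (PySem.Chars.lstrip raw.toList).length)
            + (PySem.Chars.strip raw.toList).length : Nat) : Int) := by
        simp only [PySem.Str.len_eq, PySem.Str.toList_lstrip, PySem.Str.toList_strip]
        push_cast [Nat.cast_sub hlstrip_le]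
        ring
      rw [hv]
      simp
    · have hkeep : (50 < PySem.Str.len (PySem.Str.strip raw)
          && PySem.Str.len (PySem.Str.strip raw) < 1000) = false := by
        simp only [Bool.and_eq_true, decide_eq_true_eq, PySem.Str.len_eq, PySem.Str.toList_strip,
          ← Bool.not_eq_true]
        intro hcon
        exact hkN ⟨by exact_mod_cast hcon.1, by exact_mod_cast hcon.2⟩
      have hkeep2 : (decide (50 < (PySem.Chars.strip raw.toList).length)
          && decide ((PySem.Chars.strip raw.toList).length < 1000)) = false := by
        simp only [Bool.and_eq_true, decide_eq_true_eq, ← Bool.not_eq_true]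
        intro hcon
        exact hkN ⟨hcon.1, hcon.2⟩
      rw [hstart]
      simp only [List.filter_cons, hkeep2, Bool.false_eq_true, if_false]
      simp only [List.foldl_cons, hkeep, Bool.false_eq_true, if_false]
      exact ih (off + raw.toList.length + 1) _ _ _ hposS

-- the i-th line with its cumulative start offset really is an entry of pvStarts
theorem pv_starts_mem_of :
    ∀ (ps : List (List Char)) (off i : Nat), i < ps.length →
      (off + (['\n'].intercalate (ps.take i)).length + min i 1, ps.getD i []) ∈ pvStarts ps off := by
  intro ps
  induction ps with
  | nil => intro off i hi; simp at hi
  | cons p r ih =>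
    intro off i hi
    have hu : pvStarts (p :: r) off = (off, p) :: pvStarts r (off + p.length + 1) := rfl
    rw [hu]
    cases i with
    | zero => simp [List.intercalate]
    | succ i =>
      have hi' : i < r.length := by simpa using hi
      have hins := ih (off + p.length + 1) i hi'
      have hti : (r.take i).length = i := by rw [List.length_take]; omega
      have hlen : (['\n'].intercalate ((p :: r).take (i + 1))).length
          = p.length + min i 1 + (['\n'].intercalate (r.take i)).length := by
        rw [List.take_succ_cons, pv_ic_cons]
        simp [hti]
        omega
      have heq : (off + (['\n'].intercalate ((p :: r).take (i + 1))).length + min (i + 1) 1,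
            (p :: r).getD (i + 1) [])
          = (off + p.length + 1 + (['\n'].intercalate (r.take i)).length + min i 1,
            r.getD i []) := by
        simp only [Prod.mk.injEq, List.getD_cons_succ]
        refine ⟨by rw [hlen]; omega, trivial⟩
      rw [heq]
      exact List.mem_cons_of_mem _ hins


-- the ports' String-level split agrees with D_'s List.splitOn view of the text
theorem pv_split_pieces (text : String) :
    ((PySem.Str.split? text "\n").getD []).map String.toList = text.toList.splitOn '\n' := by
  have h := PySem.Str.split?_map text "\n"
  have hsep : ("\n" : String).toList = ['\n'] := by decide
  rw [hsep] at h
  unfold PySem.Chars.split? at h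
  simp only [List.isEmpty_cons] at h
  cases hs : PySem.Str.split? text "\n" with
  | none => rw [hs] at h; simp at h
  | some sl =>
    rw [hs] at h
    simp only [Option.map_some] at h
    have : sl.map String.toList = PySem.Chars.splitOn text.toList ['\n'] := by
      exact Option.some.inj h
    rw [Option.getD_some, this, pv_splitOn]

theorem pv_ports_agree (text : String) (hD : ¬ D_response_cv_parse_regex text) :
    response_cv_parse_regex text = response_cv_parse_regex_alt text := by
  unfold response_cv_parse_regex response_cv_parse_regex_alt
  have hok : ∀ pr ∈ pvStarts (((PySem.Str.split? text "\n").getD []).map String.toList) 0,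
      ¬ pvBad text.toList pr := by
    rw [pv_split_pieces]
    exact pv_bridge text hD
  have hpre : ['\n'].intercalate (((PySem.Str.split? text "\n").getD []).map String.toList)
      <+: text.toList.drop 0 := by
    rw [pv_split_pieces, List.intercalate_splitOn, List.drop_zero]
  have := pv_fold text ((PySem.Str.split? text "\n").getD []) 0 [] [] 0 (by simp) hpre hok
  simp only [this, List.nil_append, List.map_map]
  rfl

-- inside D_, the two ports disagree (A records a strictly earlier end for the bad line)
theorem pv_tight_main (text : String) (hD : D_response_cv_parse_regex text) :
    response_cv_parse_regex text ≠ response_cv_parse_regex_alt text := by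
  obtain ⟨i, hir, hk1, hk2, hinf⟩ := hD
  have hi : i < (text.toList.splitOn '\n').length := List.mem_range.1 hir
  intro heq
  have h2 := congrArg Prod.snd heq
  have hpre : ['\n'].intercalate ((((PySem.Str.split? text "\n").getD []).map String.toList))
      <+: text.toList.drop 0 := by
    rw [pv_split_pieces, List.intercalate_splitOn, List.drop_zero]
  have hA : (response_cv_parse_regex text).2
      = [] ++ ((pvStarts ((((PySem.Str.split? text "\n").getD []).map String.toList)) 0).filter
            (fun pr => decide (50 < (PySem.Chars.strip pr.2).length)
              && decide ((PySem.Chars.strip pr.2).length < 1000))).map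
          (fun pr => PySem.Chars.find text.toList (PySem.Chars.strip pr.2)
            + ((PySem.Chars.strip pr.2).length : Int)) :=
    pv_A_end text ((PySem.Str.split? text "\n").getD []) 0 [] hpre
  have hB : (response_cv_parse_regex_alt text).2
      = [] ++ ((pvStarts ((((PySem.Str.split? text "\n").getD []).map String.toList)) 0).filter
            (fun pr => decide (50 < (PySem.Chars.strip pr.2).length)
              && decide ((PySem.Chars.strip pr.2).length < 1000))).map
          (fun pr => ((pr.1 + (pr.2.length - (PySem.Chars.lstrip pr.2).length)
            + (PySem.Chars.strip pr.2).length : Nat) : Int)) :=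
    pv_B_end text ((PySem.Str.split? text "\n").getD []) 0 [] [] 0 (by simp)
  rw [hA, hB, List.nil_append, List.nil_append, pv_split_pieces, List.map_inj_left] at h2
  -- the bad line is one of the mapped entries
  have hmem0 := pv_starts_mem_of (text.toList.splitOn '\n') 0 i hi
  have hmemF : ((0 + (['\n'].intercalate ((text.toList.splitOn '\n').take i)).length + min i 1,
        (text.toList.splitOn '\n').getD i []))
      ∈ (pvStarts (text.toList.splitOn '\n') 0).filter
          (fun pr => decide (50 < (PySem.Chars.strip pr.2).length)
            && decide ((PySem.Chars.strip pr.2).length < 1000)) := by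
    rw [List.mem_filter]
    exact ⟨hmem0, by simp only [Bool.and_eq_true, decide_eq_true_eq]; exact ⟨hk1, hk2⟩⟩
  have hval := h2 _ hmemF
  -- but A's find lands strictly before the line's own start
  obtain ⟨pre, suf, hIC⟩ := hinf
  obtain ⟨t, ht⟩ := pv_decomp i _ hi
  have hcs : text.toList
      = ['\n'].intercalate ((text.toList.splitOn '\n').take i)
        ++ List.replicate (min i 1) '\n' ++ (text.toList.splitOn '\n').getD i [] ++ t := by
    conv_lhs => rw [← List.intercalate_splitOn text.toList '\n']
    exact ht
  set s := PySem.Chars.strip ((text.toList.splitOn '\n').getD i []) with hsdef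
  set IC := ['\n'].intercalate ((text.toList.splitOn '\n').take i) with hICdef
  have hjocc : s <+: text.toList.drop pre.length := by
    rw [hcs, ← hIC]
    rw [show pre ++ s ++ suf ++ List.replicate (min i 1) '\n'
          ++ (text.toList.splitOn '\n').getD i [] ++ t
        = pre ++ (s ++ (suf ++ List.replicate (min i 1) '\n'
          ++ (text.toList.splitOn '\n').getD i [] ++ t)) by simp [List.append_assoc]]
    rw [List.drop_left]
    exact List.prefix_append _ _
  have hinf2 : s <:+: text.toList :=
    hjocc.isInfix.trans (List.drop_suffix pre.length text.toList).isInfix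
  have hnn : 0 ≤ PySem.Chars.find text.toList s := (PySem.Chars.find_nonneg_iff _ _).2 hinf2
  obtain ⟨hfocc, hfmin⟩ := PySem.Chars.find_spec hnn
  have hfle : (PySem.Chars.find text.toList s).toNat ≤ pre.length := by
    by_contra hcon
    exact hfmin pre.length (by omega) hjocc
  have hpres : pre.length + s.length ≤ IC.length := by
    have := congrArg List.length hIC
    simp only [List.length_append] at this
    omega
  have hslen : 50 < s.length := hk1
  -- the two mapped values at the bad line
  simp only at hval
  have hfval : PySem.Chars.find text.toList s + (s.length : Int)
      = ((0 + IC.length + min i 1 + (((text.toList.splitOn '\n').getD i []).length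
          - (PySem.Chars.lstrip ((text.toList.splitOn '\n').getD i [])).length)
          + s.length : Nat) : Int) := hval
  omega


-- ===== VERDICT (by name: the statement is the Claim_ definition above) =====
theorem response_cv_parse_regex_spec : Claim_unchanged_response_cv_parse_regex := by
  intro text _ hD
  exact pv_ports_agree text hD

theorem response_cv_parse_regex_changed : Claim_changed_response_cv_parse_regex := by
  unfold Claim_changed_response_cv_parse_regex; decide

theorem response_cv_parse_regex_tight : Claim_exact_response_cv_parse_regex := by
  intro text _ hD
  exact pv_tight_main text hD
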